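-- pv_equiv track=rewrite | github.com/yejin-e/Algorithm | 프로그래머스/1/250137. ［PCCP 기출문제］ 1번 ／ 붕대 감기/［PCCP 기출문제］ 1번 ／ 붕대 감기.py | solution
-- ===== SOURCE A (Python) =====
-- def solution(bandage, health, attacks):
--     answer = health                               # 현재 체력
--     cnt = 0
--
--     for a, b in attacks:
--         cnt = a - cnt - 1                          # 이전 공격으로부터 소요된 시간
--         answer += bandage[1] * cnt                 # 초당 회복량 계산
--         answer += bandage[2] * (cnt//bandage[0])   # 추가 회복량 계산
--         if answer > health:
--             answer = health
--         answer -= b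
--         if answer < 1:
--             return -1
--         cnt = a
--     return answer
-- ===== SOURCE B (Python) =====
-- def solution(bandage, health, attacks):
--     if not attacks:
--         return health
--     t, x, y = bandage[0], bandage[1], bandage[2]
--     # stage 1: closed-form net change (heal - damage) and damage for each attack
--     nets = []
--     prev = 0
--     for atk in attacks:
--         g = atk[0] - prev - 1
--         nets.append((x * g + y * (g // t) - atk[1], atk[1]))
--         prev = atk[0]
--     # stage 2: prefix sum s and running minimum u replace the capped accumulator:
--     # health after attack k equals s_k + u_k, by min(health, h+c) - d = min(h+c-d, health-d)
--     s = 0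
--     u = health
--     for n, d in nets:
--         s += n
--         u = min(u, health - d - s)
--         if s + u < 1:
--             return -1
--     return s + u
-- ===== Notes on version B (the rewrite author's own statement) =====
-- stated objective: alternative
-- what changed: B removes A's cap-to-max branch algebraically: a first pass turns each attack into a closed-form net change, a second pass maintains a prefix sum plus a running minimum (using min(health,h+c)-d = prefix + min identity) instead of A's capped health accumulator.
-- outside the precondition, e.g. on solution([1, 1, 1], 1, [[1, 5], [1]]): A returns -1, B raises IndexError; on solution([3, 2, -3], 2, [[3, 9], [9, 0, 5]]): A returns -1, B returns -1
import Mathlib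
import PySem

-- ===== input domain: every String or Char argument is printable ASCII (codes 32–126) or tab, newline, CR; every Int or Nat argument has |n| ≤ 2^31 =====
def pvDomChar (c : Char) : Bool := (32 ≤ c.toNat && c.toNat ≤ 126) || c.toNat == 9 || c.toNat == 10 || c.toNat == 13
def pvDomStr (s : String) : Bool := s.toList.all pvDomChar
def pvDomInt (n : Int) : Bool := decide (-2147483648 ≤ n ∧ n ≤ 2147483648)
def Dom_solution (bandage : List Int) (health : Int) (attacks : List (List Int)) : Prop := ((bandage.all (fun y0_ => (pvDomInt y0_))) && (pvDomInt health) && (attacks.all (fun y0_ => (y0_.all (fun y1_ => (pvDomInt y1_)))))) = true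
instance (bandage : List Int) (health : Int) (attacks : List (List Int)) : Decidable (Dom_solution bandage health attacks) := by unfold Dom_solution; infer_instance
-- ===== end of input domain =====

-- B eliminates A's cap-to-max branch algebraically: stage 1 builds closed-form net changes per
-- attack, stage 2 folds a prefix sum plus a running minimum (alternative algorithm, same cost).
-- ===== PORT A =====
def solGo (bandage : List Int) (health : Int) : List (List Int) → Int → Int → Int
  | [], answer, _ => answer
  | atk :: rest, answer, cnt =>
    let a : Int := atk.getD 0 0
    let b : Int := atk.getD 1 0
    let cnt1 : Int := a - cnt - 1
    let ans1 : Int := answer + bandage.getD 1 0 * cnt1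
    let ans2 : Int := ans1 + bandage.getD 2 0 * (PySem.Int.floordiv cnt1 (bandage.getD 0 0))
    let ans3 : Int := if ans2 > health then health else ans2
    let ans4 : Int := ans3 - b
    if ans4 < 1 then -1 else solGo bandage health rest ans4 a

def solution (bandage : List Int) (health : Int) (attacks : List (List Int)) : Int :=
  solGo bandage health attacks health 0

-- ===== PORT B =====
-- stage 1 of Source B: per-attack (net change, damage) pairs, closed-form heal
def altNets (t x y : Int) : List (List Int) → Int → List (Int × Int)
  | [], _ => []
  | atk :: rest, prev =>
    let g : Int := atk.getD 0 0 - prev - 1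
    (x * g + y * PySem.Int.floordiv g t - atk.getD 1 0, atk.getD 1 0) :: altNets t x y rest (atk.getD 0 0)

-- stage 2 of Source B: prefix sum s and running minimum u; health after attack k is s + u
def altScan (health : Int) : List (Int × Int) → Int → Int → Int
  | [], s, u => s + u
  | (n, d) :: rest, s, u =>
    let s' : Int := s + n
    let u' : Int := min u (health - d - s')
    if s' + u' < 1 then -1 else altScan health rest s' u'

def solution_alt (bandage : List Int) (health : Int) (attacks : List (List Int)) : Int :=
  if attacks = [] then health
  else altScan health (altNets (bandage.getD 0 0) (bandage.getD 1 0) (bandage.getD 2 0) attacks 0) 0 health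

-- ===== PRECONDITION & SPEC =====
-- Pre_ excludes the inputs where A raises (with attacks nonempty: bandage[0..2] missing
-- → IndexError, bandage[0] = 0 → ZeroDivisionError, a non-pair attack row A reaches →
-- ValueError) and, with them, lists whose malformed rows lie BEYOND A's early -1 exit:
-- there A's return is an artefact of which row its loop unpacks before exiting, while
-- B's staged pass reads every row first.
def Pre_solution (bandage : List Int) (health : Int) (attacks : List (List Int)) : Prop :=
  attacks = [] ∨ (3 ≤ bandage.length ∧ bandage.getD 0 0 ≠ 0 ∧ ∀ atk ∈ attacks, atk.length = 2)
instance (bandage : List Int) (health : Int) (attacks : List (List Int)) : Decidable (Pre_solution bandage health attacks) := by unfold Pre_solution; infer_instance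
def pvWitness_solution : List Int × Int × List (List Int) := ([5, 1, 5], 30, [[2, 10], [9, 15], [10, 5], [11, 5]])

def Spec_solution (bandage : List Int) (health : Int) (attacks : List (List Int)) (out : Int) : Prop := out = solution_alt bandage health attacks
instance (bandage : List Int) (health : Int) (attacks : List (List Int)) (out : Int) : Decidable (Spec_solution bandage health attacks out) := by unfold Spec_solution; infer_instance

-- ===== CLAIM (what is proved, stated in full; the proofs are below) =====
def Claim_equal_solution : Prop := ∀ (bandage : List Int) (health : Int) (attacks : List (List Int)), Dom_solution bandage health attacks → Pre_solution bandage health attacks → Spec_solution bandage health attacks (solution bandage health attacks)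

-- ===== LEMMAS AND PROOFS =====
-- Invariant: B's prefix sum s plus running minimum u is exactly A's current health answer.
theorem altScan_eq_solGo (bandage : List Int) (health : Int) :
    ∀ (atts : List (List Int)) (prev s u : Int),
      altScan health (altNets (bandage.getD 0 0) (bandage.getD 1 0) (bandage.getD 2 0) atts prev) s u
        = solGo bandage health atts (s + u) prev := by
  intro atts
  induction atts with
  | nil => intro prev s u; simp [altNets, altScan, solGo]
  | cons atk rest ih =>
    intro prev s u
    simp only [altNets, altScan, solGo]
    generalize bandage.getD 1 0 * (atk.getD 0 0 - prev - 1) = X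
    generalize bandage.getD 2 0 * PySem.Int.floordiv (atk.getD 0 0 - prev - 1) (bandage.getD 0 0) = Y
    set d : Int := atk.getD 1 0 with hd
    set ans4 : Int := (if s + u + X + Y > health then health else s + u + X + Y) - d with h4
    have key : (s + (X + Y * 1 - d)) + min u (health - d - (s + (X + Y * 1 - d))) = ans4 := by
      rw [h4]; simp only [min_def]; split_ifs <;> omega
    have key' : (s + (X + Y - d)) + min u (health - d - (s + (X + Y - d))) = ans4 := by
      have := key; omega
    by_cases hc : ans4 < 1
    · rw [if_pos (by omega : (s + (X + Y - d)) + min u (health - d - (s + (X + Y - d))) < 1),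
        if_pos hc]
    · rw [if_neg (by omega : ¬ (s + (X + Y - d)) + min u (health - d - (s + (X + Y - d))) < 1),
        if_neg hc, ih, key']

-- ===== VERDICT (by name: the statement is the Claim_ definition above) =====
theorem solution_spec : Claim_equal_solution := by
  intro bandage health attacks _ _
  unfold Spec_solution solution solution_alt
  rcases attacks with _ | ⟨atk, rest⟩
  · simp [solGo]
  · have := altScan_eq_solGo bandage health (atk :: rest) 0 0 health
    simpa using this.symm
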